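-- pv_equiv track=rewrite | github.com/ALTA-DE1-ARIF-MARZUKI-21Mar1999/Basic-Programming-Part3 | problem6/main.py | full_prima
-- ===== SOURCE A (Python) =====
-- def full_prima(N):
--     # your code here
--     if N <= 0:
--         return False
--
--     def prima(num):
--         if num < 2:
--             return False
--         for i in range(2, num):
--             if num % i == 0:
--                 return False
--         return True
--
--     while N > 0:
--         digit = N % 10
--         if not prima(digit):
--             return False
--         N //= 10
--     return True
-- ===== SOURCE B (Python) =====
-- def full_prima(N):
--     if N <= 0:
--         return False
--     return all(ch in "2357" for ch in str(N))
-- ===== Notes on version B (the rewrite author's own statement) =====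
-- stated objective: idiomatic
-- what changed: Replaces digit peeling via mod/floor-div by ten with a trial-division primality helper by a single pass over str(N) testing each character against a constant prime-digit string.
import Mathlib
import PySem

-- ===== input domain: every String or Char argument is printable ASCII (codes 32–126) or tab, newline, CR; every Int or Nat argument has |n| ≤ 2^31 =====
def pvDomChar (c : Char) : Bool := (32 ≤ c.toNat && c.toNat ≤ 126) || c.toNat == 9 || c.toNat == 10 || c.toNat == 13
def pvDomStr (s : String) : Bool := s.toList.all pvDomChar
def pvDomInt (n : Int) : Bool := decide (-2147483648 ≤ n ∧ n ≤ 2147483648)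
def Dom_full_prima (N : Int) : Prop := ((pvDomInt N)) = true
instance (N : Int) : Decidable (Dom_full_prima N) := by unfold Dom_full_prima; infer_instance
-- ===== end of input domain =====

-- B replaces %10//10 digit peeling plus a trial-division primality helper by a single pass
-- over str(N) against the constant prime-digit string "2357" (idiomatic; same cost).

-- ===== PORT A =====
-- helper `prima`: trial division over range(2, num); the for-loop with early `return False`
-- is rendered as `all` over the same range (same tests, same result).
def prima (num : Int) : Bool :=
  if num < 2 then false
  else (PySem.List.pyRange 2 num 1).all (fun i => !(PySem.Int.mod num i == 0))

-- the `while N > 0` loop of A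
def fullPrimaLoop (N : Int) : Bool :=
  if _h : 0 < N then
    if !prima (PySem.Int.mod N 10) then false
    else fullPrimaLoop (PySem.Int.floordiv N 10)
  else true
termination_by N.toNat
decreasing_by
  have : PySem.Int.floordiv N 10 = N / 10 := PySem.Int.floordiv_eq_ediv_of_pos (by omega)
  rw [this]; omega

def full_prima (N : Int) : Bool :=
  if N ≤ 0 then false else fullPrimaLoop N

-- ===== PORT B =====
def full_prima_alt (N : Int) : Bool :=
  if N ≤ 0 then false
  else (PySem.Int.toStr N).toList.all (fun c => "2357".toList.contains c)

-- ===== PRECONDITION & SPEC =====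
def Spec_full_prima (N : Int) (out : Bool) : Prop := out = full_prima_alt N
instance (N : Int) (out : Bool) : Decidable (Spec_full_prima N out) := by unfold Spec_full_prima; infer_instance

-- ===== CLAIM (what is proved, stated in full; the proofs are below) =====
def Claim_equal_full_prima : Prop := ∀ (N : Int), Dom_full_prima N → Spec_full_prima N (full_prima N)

-- ===== LEMMAS AND PROOFS =====

-- canonical "all decimal digits satisfy p ∘ digitChar" function used to bridge both loops
def natAll (p : Char → Bool) (n : Nat) : Bool :=
  if n / 10 = 0 then p (n % 10).digitChar
  else p (n % 10).digitChar && natAll p (n / 10)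
termination_by n
decreasing_by exact Nat.div_lt_self (by omega) (by omega)

def pch (c : Char) : Bool := "2357".toList.contains c

lemma prima_eq_pch (d : Int) (h0 : 0 ≤ d) (h1 : d < 10) :
    prima d = pch (Nat.digitChar d.toNat) := by
  interval_cases d <;> decide

lemma toDigitsCore_all (p : Char → Bool) :
    ∀ (fuel n : Nat) (ds : List Char), n < fuel →
      (Nat.toDigitsCore 10 fuel n ds).all p = (natAll p n && ds.all p) := by
  intro fuel
  induction fuel with
  | zero => intro n ds h; omega
  | succ fuel ih =>
    intro n ds h
    rw [Nat.toDigitsCore]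
    by_cases h10 : n / 10 = 0
    · simp only [h10, if_pos]
      rw [natAll]
      simp [h10, List.all_cons]
    · simp only [h10, if_false]
      have hlt : n / 10 < fuel := by
        have : 0 < n := by omega
        have := Nat.div_lt_self this (by omega : 1 < 10)
        omega
      rw [ih (n / 10) _ hlt]
      conv_rhs => rw [natAll]
      rw [if_neg h10]
      simp only [List.all_cons]
      cases p (n % 10).digitChar <;> cases natAll p (n / 10) <;> simp

lemma loopA_eq_natAll : ∀ (n : Nat), 0 < n → fullPrimaLoop (n : Int) = natAll pch n := by
  intro n
  induction n using Nat.strong_induction_on with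
  | _ n ih =>
    intro hn
    rw [fullPrimaLoop]
    have hpos : (0 : Int) < (n : Int) := by exact_mod_cast hn
    simp only [hpos, dif_pos]
    have hmod : PySem.Int.mod (n : Int) 10 = ((n % 10 : Nat) : Int) := by
      exact_mod_cast PySem.Int.mod_natCast n 10
    have hdiv : PySem.Int.floordiv (n : Int) 10 = ((n / 10 : Nat) : Int) := by
      exact_mod_cast PySem.Int.floordiv_natCast n 10
    rw [hmod, hdiv]
    have hp : prima ((n % 10 : Nat) : Int) = pch (Nat.digitChar (n % 10)) := by
      have := prima_eq_pch ((n % 10 : Nat) : Int) (by exact_mod_cast Nat.zero_le _)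
        (by exact_mod_cast Nat.mod_lt n (by omega))
      simpa using this
    rw [hp, natAll]
    by_cases h10 : n / 10 = 0
    · simp only [h10, if_pos, Nat.cast_zero]
      rw [show fullPrimaLoop 0 = true from by rw [fullPrimaLoop]; simp]
      cases pch (n % 10).digitChar <;> simp
    · simp only [h10, if_false]
      rw [ih (n / 10) (Nat.div_lt_self (by omega) (by omega)) (by omega)]
      cases pch (Nat.digitChar (n % 10)) <;> simp

lemma altB_eq_natAll : ∀ (n : Nat), 0 < n →
    ((PySem.Int.toStr (n : Int)).toList.all pch) = natAll pch n := by
  intro n hn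
  rw [PySem.Int.toList_toStr]
  unfold PySem.Int.toChars
  have hneg : ¬ ((n : Int) < 0) := by omega
  simp only [hneg, if_false]
  have htoNat : ((n : Int)).toNat = n := Int.toNat_natCast n
  rw [htoNat]
  unfold Nat.toDigits
  rw [toDigitsCore_all pch (n + 1) n [] (by omega)]
  simp

-- ===== VERDICT (by name: the statement is the Claim_ definition above) =====
theorem full_prima_spec : Claim_equal_full_prima := by
  intro N _
  unfold Spec_full_prima full_prima full_prima_alt
  by_cases h : N ≤ 0
  · simp [h]
  · simp only [h, if_false]
    have hpos : 0 < N := by omega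
    obtain ⟨n, rfl⟩ : ∃ n : Nat, N = (n : Int) := ⟨N.toNat, by omega⟩
    have hn : 0 < n := by exact_mod_cast hpos
    rw [loopA_eq_natAll n hn]
    rw [show (fun c => "2357".toList.contains c) = pch from rfl]
    exact (altB_eq_natAll n hn).symm
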